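-- pv_equiv track=rewrite | github.com/sanskrit-lexicon/PWK | pw_ls/pw_ls_AB/diffls4a.py | generate_ab_ls
-- ===== SOURCE A (Python) =====
-- def generate_ab_ls(lsarr):
--  """ combine <ls> and following <ln>
--  """
--  val = None # previous <ls>x</ls>
--  for idx,item in enumerate(lsarr):
--   if idx == 0:
--    if item.startswith('<ln>'):
--     yield item
--    else:  # it is <ls>
--     val = item
--   elif item.startswith('<ls>'):
--    if val != None:
--     yield val
--    val = item
--   else: # item = '<ln>'
--    if val != None:
--     newval = val + item
--     yield newval
--     val = None
--    else:
--     yield item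
--     val = None
--  if val != None:
--   yield val  # last one
-- ===== SOURCE B (Python) =====
-- def generate_ab_ls(lsarr):
--     """ combine <ls> and following <ln> """
--     items = list(lsarr)
--     n = len(items)
--     i = 0
--     while i < n:
--         item = items[i]
--         # the first item counts as a pending <ls> whenever it is not an <ln>;
--         # afterwards only genuine <ls> items are merge candidates
--         held = item.startswith('<ls>') or (i == 0 and not item.startswith('<ln>'))
--         if held and i + 1 < n and not items[i + 1].startswith('<ls>'):
--             yield item + items[i + 1]
--             i += 2
--         else:
--             yield item
--             i += 1
-- ===== Notes on version B (the rewrite author's own statement) =====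
-- stated objective: simpler
-- what changed: Replaces the carried pending-value state machine with a flush at the end by an index walk with one-item lookahead that emits each item merged or alone immediately.
import Mathlib
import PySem

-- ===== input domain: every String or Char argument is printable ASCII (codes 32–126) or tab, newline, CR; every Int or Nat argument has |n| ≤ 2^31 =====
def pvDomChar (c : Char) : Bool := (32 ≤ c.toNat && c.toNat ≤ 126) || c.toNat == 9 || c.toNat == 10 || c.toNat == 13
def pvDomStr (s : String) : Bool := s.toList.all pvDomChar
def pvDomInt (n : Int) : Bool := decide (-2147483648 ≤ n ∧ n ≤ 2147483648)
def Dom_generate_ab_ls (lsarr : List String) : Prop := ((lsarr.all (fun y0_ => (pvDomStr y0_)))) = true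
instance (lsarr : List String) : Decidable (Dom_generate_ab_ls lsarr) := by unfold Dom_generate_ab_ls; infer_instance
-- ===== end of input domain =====

-- B replaces A's carried pending-value state machine (flushed at the end) by an
-- index walk with one-item lookahead that emits each item merged or alone at once; objective: simpler.

-- ===== PORT A =====
-- A's loop state: (val : pending item or none, out : items yielded so far)
def pvStepA (st : Option String × List String) (p : Int × String) : Option String × List String :=
  let (val, out) := st
  let (idx, item) := p
  if idx = 0 then
    if PySem.Str.startswith item "<ln>" then (val, out ++ [item])
    else (some item, out)
  else if PySem.Str.startswith item "<ls>" then
    match val with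
    | some v => (some item, out ++ [v])
    | none => (some item, out)
  else
    match val with
    | some v => (none, out ++ [v ++ item])
    | none => (none, out ++ [item])

def generate_ab_ls (lsarr : List String) : List String :=
  let st := (PySem.List.enumerate lsarr).foldl pvStepA (none, [])
  match st.1 with
  | some v => st.2 ++ [v]
  | none => st.2

-- ===== PORT B =====
-- B's while loop over the index with lookahead, as structural recursion
-- consuming one or two items per step; `first` tracks i == 0.
def pvGoB (first : Bool) : List String → List String
  | [] => []
  | item :: rest =>
    let held := PySem.Str.startswith item "<ls>" || (first && !PySem.Str.startswith item "<ln>")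
    match rest with
    | [] => [item]
    | next :: rest' =>
      if held && !PySem.Str.startswith next "<ls>" then (item ++ next) :: pvGoB false rest'
      else item :: pvGoB false (next :: rest')

def generate_ab_ls_alt (lsarr : List String) : List String := pvGoB true lsarr

-- ===== PRECONDITION & SPEC =====
def Spec_generate_ab_ls (lsarr : List String) (out : List String) : Prop := out = generate_ab_ls_alt lsarr
instance (lsarr : List String) (out : List String) : Decidable (Spec_generate_ab_ls lsarr out) := by unfold Spec_generate_ab_ls; infer_instance

-- ===== CLAIM (what is proved, stated in full; the proofs are below) =====
def Claim_equal_generate_ab_ls : Prop := ∀ (lsarr : List String), Dom_generate_ab_ls lsarr → Spec_generate_ab_ls lsarr (generate_ab_ls lsarr)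

-- ===== LEMMAS AND PROOFS =====

-- What A's loop from index ≥ 1 computes, written as two mutually recursive list functions:
-- pvHeld v rest = output of the rest of the loop with pending val = some v (including the final flush)
-- pvNone rest   = same with pending val = none
mutual
def pvHeld (v : String) : List String → List String
  | [] => [v]
  | x :: r => if PySem.Str.startswith x "<ls>" then v :: pvHeld x r else (v ++ x) :: pvNone r
def pvNone : List String → List String
  | [] => []
  | x :: r => if PySem.Str.startswith x "<ls>" then pvHeld x r else x :: pvNone r
end

def pvFlush (st : Option String × List String) : List String :=
  match st.1 with
  | some v => st.2 ++ [v]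
  | none => st.2

-- A's fold over indices ≥ 1, characterised
theorem pvFoldA (rest : List String) : ∀ (k : Int) (out : List String), 1 ≤ k →
    (∀ v, pvFlush ((PySem.List.enumerate rest k).foldl pvStepA (some v, out)) = out ++ pvHeld v rest)
    ∧ pvFlush ((PySem.List.enumerate rest k).foldl pvStepA (none, out)) = out ++ pvNone rest := by
  induction rest with
  | nil => intro k out _; simp [PySem.List.enumerate_nil, pvFlush, pvHeld, pvNone]
  | cons x r ih =>
    intro k out hk
    have hk0 : ¬ k = 0 := by omega
    have hk1 : (1:Int) ≤ k + 1 := by omega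
    constructor
    · intro v
      rw [PySem.List.enumerate_cons, List.foldl_cons]
      simp only [pvStepA]
      rw [if_neg hk0]
      by_cases hx : PySem.Str.startswith x "<ls>" = true
      · rw [if_pos hx, (ih (k+1) (out ++ [v]) hk1).1 x]
        simp only [pvHeld]
        rw [if_pos hx]
        simp
      · rw [if_neg hx, (ih (k+1) (out ++ [v ++ x]) hk1).2]
        simp only [pvHeld]
        rw [if_neg hx]
        simp
    · rw [PySem.List.enumerate_cons, List.foldl_cons]
      simp only [pvStepA]
      rw [if_neg hk0]
      by_cases hx : PySem.Str.startswith x "<ls>" = true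
      · rw [if_pos hx, (ih (k+1) out hk1).1 x]
        simp only [pvNone]
        rw [if_pos hx]
      · rw [if_neg hx, (ih (k+1) (out ++ [x]) hk1).2]
        simp only [pvNone]
        rw [if_neg hx]
        simp

-- pvHeld/pvNone coincide with B's recursion
theorem pvHeldNone_eq (rest : List String) :
    (∀ v, pvHeld v rest =
      (match rest with
       | [] => [v]
       | y :: r => if PySem.Str.startswith y "<ls>" then v :: pvGoB false (y :: r) else (v ++ y) :: pvGoB false r))
    ∧ pvNone rest = pvGoB false rest := by
  induction rest with
  | nil => exact ⟨fun v => by simp only [pvHeld], by simp only [pvNone, pvGoB]⟩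
  | cons x r ih =>
    have key : PySem.Str.startswith x "<ls>" = true → pvHeld x r = pvGoB false (x :: r) := by
      intro hx
      cases r with
      | nil => simp only [pvHeld, pvGoB]
      | cons y r' =>
        rw [ih.1 x]
        simp only [pvGoB, hx, Bool.true_or, Bool.true_and]
        by_cases hy : PySem.Str.startswith y "<ls>" = true
        · rw [if_pos hy, hy]
          simp only [Bool.not_true]
          rw [if_neg Bool.false_ne_true]
        · simp only [Bool.not_eq_true] at hy
          rw [if_neg (by rw [hy]; exact Bool.false_ne_true), hy]
          simp only [Bool.not_false, reduceIte]
    constructor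
    · intro v
      simp only [pvHeld]
      by_cases hx : PySem.Str.startswith x "<ls>" = true
      · rw [if_pos hx, if_pos hx, key hx]
      · rw [if_neg hx, if_neg hx, ih.2]
    · simp only [pvNone]
      by_cases hx : PySem.Str.startswith x "<ls>" = true
      · rw [if_pos hx, key hx]
      · rw [if_neg hx, ih.2]
        cases r with
        | nil => simp only [pvGoB]
        | cons y r' =>
          simp only [Bool.not_eq_true] at hx
          simp only [pvGoB, hx, Bool.false_or, Bool.false_and]
          rw [if_neg Bool.false_ne_true]

-- "<ln>"-prefixed strings never carry the "<ls>" prefix (the characters differ)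
theorem pv_ln_not_ls (x : String) (h : PySem.Str.startswith x "<ln>" = true) :
    PySem.Str.startswith x "<ls>" = false := by
  simp only [PySem.Str.startswith_eq] at *
  rcases hx : x.toList with _ | ⟨a, _ | ⟨b, _ | ⟨c, rest⟩⟩⟩ <;>
    simp_all [PySem.Chars.startswith, List.isPrefixOf]
  intro _ _ h3
  rw [← h3] at h
  simp at h

-- ===== VERDICT (by name: the statement is the Claim_ definition above) =====
theorem generate_ab_ls_spec : Claim_equal_generate_ab_ls := by
  intro lsarr _
  show generate_ab_ls lsarr = generate_ab_ls_alt lsarr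
  cases lsarr with
  | nil => rfl
  | cons x rest =>
    show pvFlush (List.foldl pvStepA (pvStepA (none, []) (0, x)) (PySem.List.enumerate rest (0 + 1))) =
      pvGoB true (x :: rest)
    rw [show (0:Int) + 1 = 1 from rfl]
    simp only [pvStepA]
    rw [if_pos trivial]
    by_cases hx : PySem.Str.startswith x "<ln>" = true
    · rw [if_pos hx, (pvFoldA rest 1 ([] ++ [x]) (le_refl 1)).2, (pvHeldNone_eq rest).2]
      have hxls := pv_ln_not_ls x hx
      cases rest with
      | nil => simp [pvGoB]
      | cons y r' =>
        simp only [pvGoB, hxls, hx, Bool.not_true, Bool.and_false, Bool.false_or, Bool.false_and]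
        rw [if_neg Bool.false_ne_true]
        simp
    · rw [if_neg hx, (pvFoldA rest 1 [] (le_refl 1)).1 x, (pvHeldNone_eq rest).1 x]
      simp only [Bool.not_eq_true] at hx
      cases rest with
      | nil => simp [pvGoB]
      | cons y r' =>
        simp only [pvGoB, hx, Bool.not_false, Bool.and_true, Bool.or_true, Bool.true_and, List.nil_append]
        by_cases hy : PySem.Str.startswith y "<ls>" = true
        · rw [if_pos hy, hy]
          simp only [Bool.not_true]
          rw [if_neg Bool.false_ne_true]
        · simp only [Bool.not_eq_true] at hy
          rw [if_neg (by rw [hy]; exact Bool.false_ne_true), hy]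
          simp only [Bool.not_false]
          rw [if_pos trivial]
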